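-- pv_equiv track=rewrite | github.com/dopsnachi/quiz-app | app.py | getField
-- ===== SOURCE A (Python) =====
-- def getField(line,field):
--     storedField=""
--     c=''
--     idx=0
--     commaFound=0
--     while ( commaFound < field+1 and idx < len(line)):
--         c=line[idx]
--         if c == ',':
--             commaFound+=1
--         elif commaFound == field:
--             storedField=storedField+str(c)
--         idx+=1
--     return storedField
-- ===== SOURCE B (Python) =====
-- def getField(line, field):
--     parts = line.split(',')
--     if 0 <= field < len(parts):
--         return parts[field]
--     return ""
-- ===== Notes on version B (the rewrite author's own statement) =====
-- stated objective: idiomatic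
-- what changed: Replaces the char-by-char comma-counting scan with a single line.split(',') plus a bounds-checked index, returning '' for negative or out-of-range field.
import Mathlib
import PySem

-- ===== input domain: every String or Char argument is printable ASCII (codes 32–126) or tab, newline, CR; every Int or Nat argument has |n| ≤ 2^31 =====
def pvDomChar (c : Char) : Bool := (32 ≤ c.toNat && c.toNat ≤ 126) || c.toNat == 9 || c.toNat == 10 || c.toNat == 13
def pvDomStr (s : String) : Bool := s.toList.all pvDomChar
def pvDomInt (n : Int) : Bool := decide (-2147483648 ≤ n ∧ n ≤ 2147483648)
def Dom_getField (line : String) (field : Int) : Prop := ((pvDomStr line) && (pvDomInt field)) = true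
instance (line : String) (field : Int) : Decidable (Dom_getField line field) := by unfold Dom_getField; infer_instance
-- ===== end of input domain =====

-- B replaces A's char-by-char comma-counting scan by split(',') plus a bounds-checked index (idiomatic rewrite, same behaviour).

-- ===== PORT A =====
-- A's while loop: state = (remaining chars, commaFound, storedField); the condition
-- 'commaFound < field+1 and idx < len(line)' is checked before each step, exactly as in A.
def getFieldLoop (field : Int) : List Char → Int → List Char → List Char
  | cs, commaFound, stored =>
    if commaFound < field + 1 then
      match cs with
      | [] => stored
      | c :: rest =>
        if c = ',' then getFieldLoop field rest (commaFound + 1) stored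
        else if commaFound = field then getFieldLoop field rest commaFound (stored ++ [c])
        else getFieldLoop field rest commaFound stored
    else stored

def getField (line : String) (field : Int) : String :=
  String.ofList (getFieldLoop field line.toList 0 [])

-- ===== PORT B =====
def getField_alt (line : String) (field : Int) : String :=
  let parts := PySem.Chars.splitOn line.toList [',']   -- parts = line.split(',')
  if h : 0 ≤ field ∧ field.toNat < parts.length        -- 0 <= field < len(parts)
  then String.ofList (parts[field.toNat]'h.2) else ""

-- ===== PRECONDITION & SPEC =====
def Spec_getField (line : String) (field : Int) (out : String) : Prop := out = getField_alt line field
instance (line : String) (field : Int) (out : String) : Decidable (Spec_getField line field out) := by unfold Spec_getField; infer_instance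

-- ===== CLAIM (what is proved, stated in full; the proofs are below) =====
def Claim_equal_getField : Prop := ∀ (line : String) (field : Int), Dom_getField line field → Spec_getField line field (getField line field)

-- ===== LEMMAS AND PROOFS =====

-- split on ',' written as plain structural recursion, the current field as accumulator
def pvSplit (pre : List Char) : List Char → List (List Char)
  | [] => [pre]
  | c :: rest => if c = ',' then pre :: pvSplit [] rest else pvSplit (pre ++ [c]) rest



def pvIdx (xs : List (List Char)) (i : Int) : List Char :=
  if h : 0 ≤ i ∧ i.toNat < xs.length then xs[i.toNat]'h.2 else []

theorem pvSplit_comma (pre rest) : pvSplit pre (',' :: rest) = pre :: pvSplit [] rest := by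
  simp [pvSplit]

theorem pvSplit_cons (pre c rest) (hc : ¬ c = ',') : pvSplit pre (c :: rest) = pvSplit (pre ++ [c]) rest := by
  simp [pvSplit, hc]

theorem pvSplit_ne_nil (pre cs : List Char) : pvSplit pre cs ≠ [] := by
  cases cs with
  | nil => simp [pvSplit]
  | cons c rest =>
    simp only [pvSplit]
    split
    · simp
    · exact pvSplit_ne_nil _ _

theorem pvSplit_pre (cs : List Char) : ∀ (pre : List Char),
    pvSplit pre cs = (pre ++ (pvSplit [] cs).headI) :: (pvSplit [] cs).tail := by
  induction cs with
  | nil => intro pre; simp [pvSplit]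
  | cons c rest ih =>
    intro pre
    by_cases hc : c = ','
    · simp [pvSplit, hc]
    · rw [pvSplit_cons _ _ _ hc, pvSplit_cons _ _ _ hc, ih (pre ++ [c]), ih ([] ++ [c])]
      simp

theorem pvIdx_zero (x : List Char) (t : List (List Char)) : pvIdx (x :: t) 0 = x := by
  simp [pvIdx]

theorem pvIdx_pos (x : List Char) (t : List (List Char)) (i : Int) (h : 0 < i) :
    pvIdx (x :: t) i = pvIdx t (i - 1) := by
  unfold pvIdx
  have hi : i.toNat = (i - 1).toNat + 1 := by omega
  by_cases hb : 0 ≤ i - 1 ∧ (i - 1).toNat < t.length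
  · rw [dif_pos hb, dif_pos ⟨by omega, by rw [List.length_cons]; omega⟩]
    simp only [hi, List.getElem_cons_succ]
  · rw [dif_neg hb, dif_neg (by rw [List.length_cons]; intro hcon; exact absurd hcon.2 (by omega))]

theorem pvIdx_nil_singleton (i : Int) : pvIdx [[]] i = [] := by
  unfold pvIdx
  split
  · next h =>
      rw [List.length_singleton] at h
      have h0 : i.toNat = 0 := by omega
      simp [h0]
  · rfl

theorem loop_stop (field : Int) (cs : List Char) (k : Int) (acc : List Char) (h : ¬ k < field + 1) :
    getFieldLoop field cs k acc = acc := by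
  cases cs <;> · rw [getFieldLoop, if_neg h]

theorem loop_eq_idx (field : Int) (cs : List Char) :
    ∀ (k : Int) (acc : List Char), k ≤ field →
    getFieldLoop field cs k acc = acc ++ pvIdx (pvSplit [] cs) (field - k) := by
  induction cs with
  | nil =>
    intro k acc hk
    rw [getFieldLoop, if_pos (by omega)]
    simp [pvSplit, pvIdx_nil_singleton]
  | cons c rest ih =>
    intro k acc hk
    rw [getFieldLoop, if_pos (by omega : k < field + 1)]
    by_cases hc : c = ','
    · subst hc
      rw [if_pos rfl, pvSplit_comma]
      by_cases hkf : k = field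
      · subst hkf
        rw [loop_stop _ _ _ _ (by omega), sub_self, pvIdx_zero]
        simp
      · rw [ih (k + 1) acc (by omega), pvIdx_pos _ _ _ (by omega)]
        ring_nf
    · rw [if_neg hc, pvSplit_cons _ _ _ hc, pvSplit_pre rest, List.nil_append]
      by_cases hkf : k = field
      · subst hkf
        rw [if_pos rfl, ih k (acc ++ [c]) le_rfl, sub_self, pvIdx_zero]
        rcases h : pvSplit [] rest with _ | ⟨hh, tt⟩
        · exact absurd h (pvSplit_ne_nil [] rest)
        · rw [pvIdx_zero]
          simp
      · rw [if_neg hkf, ih k acc hk]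
        rcases h : pvSplit [] rest with _ | ⟨hh, tt⟩
        · exact absurd h (pvSplit_ne_nil [] rest)
        · rw [pvIdx_pos _ _ _ (by omega), pvIdx_pos _ _ _ (by omega)]
          simp

theorem pvSplit_go (l : List Char) : ∀ (fuel : Nat), l.length ≤ fuel → ∀ (cur : List Char) (acc : List (List Char)),
    PySem.Chars.splitOn.go [','] fuel l cur acc = acc.reverse ++ pvSplit cur.reverse l := by
  induction l with
  | nil =>
    intro fuel _ cur acc
    cases fuel <;> simp [PySem.Chars.splitOn.go, pvSplit]
  | cons c rest ih =>
    intro fuel hf cur acc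
    cases fuel with
    | zero => simp at hf
    | succ f =>
      simp only [PySem.Chars.splitOn.go]
      by_cases hc : c = ','
      · subst hc
        rw [if_pos (by simp [List.isPrefixOf])]
        show PySem.Chars.splitOn.go [','] f rest [] (cur.reverse :: acc) = _
        rw [ih f (by simpa using hf) [] (cur.reverse :: acc)]
        simp [pvSplit]
      · rw [if_neg (by simp [List.isPrefixOf]; exact fun h => hc h.symm)]
        rw [ih f (by simpa using hf) (c :: cur) acc]
        simp [pvSplit, hc]

theorem splitOn_eq_pvSplit (cs : List Char) :
    PySem.Chars.splitOn cs [','] = pvSplit [] cs := by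
  have := pvSplit_go cs (cs.length + 1) (by omega) [] []
  simpa [PySem.Chars.splitOn] using this

-- ===== VERDICT (by name: the statement is the Claim_ definition above) =====
theorem getField_spec : Claim_equal_getField := by
  intro line field _
  show getField line field = getField_alt line field
  unfold getField getField_alt
  simp only [splitOn_eq_pvSplit]
  by_cases hf : 0 ≤ field
  · rw [loop_eq_idx field _ 0 [] hf]
    simp only [List.nil_append, pvIdx, sub_zero]
    split <;> rfl
  · rw [loop_stop _ _ _ _ (by omega), dif_neg (by intro h; exact hf h.1)]
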